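-- pv_equiv track=rewrite | github.com/thisisiron/Algorithm | Programmers/kakao_intern/2020/cave_re.py | solution
-- ===== SOURCE A (Python) =====
-- from collections import deque
--
-- def solution(n, path, order):
--     graph = [[] for _ in range(n + 1)]
--     for u, v in path:
--         graph[u].append(v)
--         graph[v].append(u)
--
--     start = 0
--     visited = [0] * (n + 1)
--     queue = deque()
--     tree = [[] for _ in range(n + 1)]
--
--     queue.append(start)
--     visited[start] = 1
--     while queue:
--         cur = queue.popleft()
--
--         for nxt in graph[cur]:
--             if not visited[nxt]:
--                 queue.append(nxt)
--                 tree[cur].append(nxt)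
--                 visited[nxt] = 1
--
--     # keypoint!!!
--     for u, v in order:
--         tree[u].append(v)
--
--     visited = [0] * (n + 1)
--     checked = [0] * (n + 1)
--
--     is_cycle = check_cycle(tree, visited, checked, start)
--
--     return not is_cycle
--
-- def check_cycle(tree, visited, checked, start):
--     visited[start] = 1
--     checked[start] = 1
--
--     for nxt in tree[start]:
--         if not checked[nxt]:
--             if check_cycle(tree, visited, checked, nxt):
--                 return True
--         if visited[nxt]:
--             return True
--     visited[start] = 0
--     return False
-- ===== SOURCE B (Python) =====
-- from collections import deque
--
-- def solution(n, path, order):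
--     # phase 1 (identical to the original by necessity: the BFS tree orientation
--     # is part of the specified behaviour)
--     graph = [[] for _ in range(n + 1)]
--     for u, v in path:
--         graph[u].append(v)
--         graph[v].append(u)
--
--     visited = [0] * (n + 1)
--     queue = deque()
--     tree = [[] for _ in range(n + 1)]
--     queue.append(0)
--     visited[0] = 1
--     while queue:
--         cur = queue.popleft()
--         for nxt in graph[cur]:
--             if not visited[nxt]:
--                 queue.append(nxt)
--                 tree[cur].append(nxt)
--                 visited[nxt] = 1
--     for u, v in order:
--         tree[u].append(v)
--
--     # phase 2: feasible iff no directed cycle of `tree` is reachable from 0.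
--     # count the slots reachable from 0 in `tree`
--     seen = [0] * (n + 1)
--     seen[0] = 1
--     cnt = 1
--     stack = [0]
--     while stack:
--         v = stack.pop()
--         for w in tree[v]:
--             if not seen[w]:
--                 seen[w] = 1
--                 cnt += 1
--                 stack.append(w)
--
--     # pigeonhole: a cycle is reachable from 0 iff some walk of length cnt
--     # leaves 0; advance the frontier of walk endpoints cnt times
--     frontier = {0}
--     for _ in range(cnt):
--         if not frontier:
--             break
--         frontier = {w for v in frontier for w in tree[v]}
--     return not frontier
-- ===== Notes on version B (the rewrite author's own statement) =====
-- stated objective: alternative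
-- what changed: The recursive white/gray/black DFS cycle check is replaced by an iterative reachability count plus a pigeonhole frontier iteration: a cycle of the order-augmented BFS tree is reachable from node 0 iff some walk of length R (R = number of slots reachable from 0) starts at 0, so B advances the set of walk endpoints R times and tests whether it dies out; the adjacency/BFS-tree build phase is kept identical because the BFS tree orientation is part of the behaviour.
-- outside the precondition, e.g. on solution(1, [], [[1, 5]]): A returns True, B returns True
import Mathlib
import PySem

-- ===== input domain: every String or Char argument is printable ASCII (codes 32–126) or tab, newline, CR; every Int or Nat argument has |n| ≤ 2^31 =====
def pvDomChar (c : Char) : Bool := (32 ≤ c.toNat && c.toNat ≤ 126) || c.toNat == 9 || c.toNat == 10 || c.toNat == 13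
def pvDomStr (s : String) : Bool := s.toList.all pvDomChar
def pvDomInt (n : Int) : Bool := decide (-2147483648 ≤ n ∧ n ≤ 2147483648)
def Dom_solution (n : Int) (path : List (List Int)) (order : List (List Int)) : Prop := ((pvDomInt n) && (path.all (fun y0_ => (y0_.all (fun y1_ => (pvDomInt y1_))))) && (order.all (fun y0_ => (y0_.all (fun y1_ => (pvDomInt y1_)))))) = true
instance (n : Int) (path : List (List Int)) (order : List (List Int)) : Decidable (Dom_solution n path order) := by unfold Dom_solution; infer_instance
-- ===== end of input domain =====

-- B replaces the recursive three-colour DFS cycle check by a reachability count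
-- plus a pigeonhole frontier iteration; the adjacency/BFS-tree build phase is
-- identical in A and B (the BFS tree orientation is part of the behaviour), so
-- it is shared below.  Objective: a genuinely different algorithm, not speed.

-- ===== PORT A =====
-- phase 1, shared verbatim by both Pythons: adjacency lists, BFS tree from 0,
-- then the order edges appended.  tree[u].append(x)  (Python indexing semantics):
def pvPush (t : List (List Int)) (i : Int) (x : Int) : List (List Int) :=
  PySem.List.pySetD t i (PySem.List.pyGetD t i [] ++ [x])

def pvBuildGraph (n : Int) (path : List (List Int)) : List (List Int) :=
  path.foldl (fun g row =>
    match row with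
    | [u, v] => pvPush (pvPush g u v) v u
    | _ => g) (List.replicate (n + 1).toNat [])

-- while queue: cur = queue.popleft(); for nxt in graph[cur]: …
-- (fuel: each slot is enqueued at most once, so (n+2) pops never run out)
def pvBfs (fuel : Nat) (graph : List (List Int)) (queue : List Int)
    (visited : List Int) (tree : List (List Int)) : List (List Int) :=
  match fuel with
  | 0 => tree
  | fuel + 1 =>
    match queue with
    | [] => tree
    | cur :: qs =>
      let st := (PySem.List.pyGetD graph cur []).foldl
        (fun (st : List Int × List Int × List (List Int)) nxt =>
          if PySem.List.pyGetD st.2.1 nxt 0 = 0 then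
            (st.1 ++ [nxt], PySem.List.pySetD st.2.1 nxt 1, pvPush st.2.2 cur nxt)
          else st)
        (qs, visited, tree)
      pvBfs fuel graph st.1 st.2.1 st.2.2

def pvTree (n : Int) (path : List (List Int)) (order : List (List Int)) : List (List Int) :=
  let graph := pvBuildGraph n path
  let visited := PySem.List.pySetD (List.replicate (n + 1).toNat (0 : Int)) 0 1
  let tree := pvBfs (n + 2).toNat graph [0] visited (List.replicate (n + 1).toNat [])
  order.foldl (fun t row =>
    match row with
    | [u, v] => pvPush t u v
    | _ => t) tree

-- check_cycle: recursive white/gray/black DFS, state = (visited, checked)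
-- (fuel: recursion only enters unchecked slots, so (n+2) levels never run out)
mutual
def pvDfs (fuel : Nat) (tree : List (List Int)) (s : Int)
    (vis chk : List Int) : Bool × List Int × List Int :=
  match fuel with
  | 0 => (true, vis, chk)
  | fuel + 1 =>
    pvGo fuel tree s (PySem.List.pyGetD tree s [])
      (PySem.List.pySetD vis s 1) (PySem.List.pySetD chk s 1)
termination_by (fuel, 0)

def pvGo (fuel : Nat) (tree : List (List Int)) (s : Int) (succs : List Int)
    (vis chk : List Int) : Bool × List Int × List Int :=
  match succs with
  | [] => (false, PySem.List.pySetD vis s 0, chk)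
  | nxt :: rest =>
    if PySem.List.pyGetD chk nxt 0 = 0 then
      let r := pvDfs fuel tree nxt vis chk
      if r.1 then r
      else if PySem.List.pyGetD r.2.1 nxt 0 ≠ 0 then (true, r.2.1, r.2.2)
      else pvGo fuel tree s rest r.2.1 r.2.2
    else if PySem.List.pyGetD vis nxt 0 ≠ 0 then (true, vis, chk)
    else pvGo fuel tree s rest vis chk
termination_by (fuel, succs.length + 1)
end

def solution (n : Int) (path : List (List Int)) (order : List (List Int)) : Bool :=
  let tree := pvTree n path order
  let r := pvDfs (n + 2).toNat tree 0
    (List.replicate (n + 1).toNat 0) (List.replicate (n + 1).toNat 0)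
  !r.1

-- ===== PORT B =====
-- phase 2 of B: count the slots reachable from 0 in `tree` (iterative stack
-- scan with a seen array), then advance the frontier of walk endpoints that
-- many times; by pigeonhole a cycle is reachable from 0 iff the frontier
-- survives.  (fuel: each slot is pushed at most once, so (n+2) pops suffice)
def pvReach (fuel : Nat) (tree : List (List Int)) (stack : List Int)
    (seen : List Int) (cnt : Int) : List Int × Int :=
  match fuel with
  | 0 => (seen, cnt)
  | fuel + 1 =>
    match stack with
    | [] => (seen, cnt)
    | v :: stk =>
      let st := (PySem.List.pyGetD tree v []).foldl
        (fun (st : List Int × List Int × Int) w =>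
          if PySem.List.pyGetD st.2.1 w 0 = 0 then
            (w :: st.1, PySem.List.pySetD st.2.1 w 1, st.2.2 + 1)
          else st)
        (stk, seen, cnt)
      pvReach fuel tree st.1 st.2.1 st.2.2

-- frontier = {w for v in frontier for w in tree[v]}
def pvStep (tree : List (List Int)) (fr : List Int) : List Int :=
  PySem.Set.ofList (fr.flatMap (fun v => PySem.List.pyGetD tree v []))

def pvFrontier (k : Nat) (tree : List (List Int)) (fr : List Int) : List Int :=
  match k with
  | 0 => fr
  | k + 1 => if fr.isEmpty then fr else pvFrontier k tree (pvStep tree fr)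

def solution_alt (n : Int) (path : List (List Int)) (order : List (List Int)) : Bool :=
  let tree := pvTree n path order
  let seen := PySem.List.pySetD (List.replicate (n + 1).toNat (0 : Int)) 0 1
  let rc := pvReach (n + 2).toNat tree [0] seen 1
  let fr := pvFrontier rc.2.toNat tree (PySem.Set.ofList [0])
  fr.isEmpty

-- ===== PRECONDITION & SPEC =====
-- Pre_ excludes the inputs where the Python A raises: n < 0 (IndexError on
-- visited[0]), a path/order row that is not a pair (ValueError on unpacking),
-- or an entry outside [-(n+1), n] (IndexError on indexing); an out-of-range
-- SECOND entry of an order row that the cycle scan never reaches makes A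
-- return after all, but it is excluded together with the other malformed node
-- ids (both programs return the same value there).  Entries in [-(n+1), -1]
-- are admitted: both programs use Python's negative-index wraparound
-- identically.
def Pre_solution (n : Int) (path : List (List Int)) (order : List (List Int)) : Prop :=
  0 ≤ n ∧
  (∀ r ∈ path, r.length = 2 ∧ ∀ x ∈ r, -(n + 1) ≤ x ∧ x ≤ n) ∧
  (∀ r ∈ order, r.length = 2 ∧ ∀ x ∈ r, -(n + 1) ≤ x ∧ x ≤ n)
instance (n : Int) (path : List (List Int)) (order : List (List Int)) : Decidable (Pre_solution n path order) := by unfold Pre_solution; infer_instance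

def pvWitness_solution : Int × List (List Int) × List (List Int) := (2, [[0, 1], [1, 2]], [[2, 0]])

def Spec_solution (n : Int) (path : List (List Int)) (order : List (List Int)) (out : Bool) : Prop := out = solution_alt n path order
instance (n : Int) (path : List (List Int)) (order : List (List Int)) (out : Bool) : Decidable (Spec_solution n path order out) := by unfold Spec_solution; infer_instance

-- ===== CLAIM (what is proved, stated in full; the proofs are below) =====
def Claim_equal_solution : Prop := ∀ (n : Int) (path : List (List Int)) (order : List (List Int)), Dom_solution n path order → Pre_solution n path order → Spec_solution n path order (solution n path order)

-- ===== LEMMAS AND PROOFS =====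

def VIdx (N : Nat) (v : Int) : Nat := (if v < 0 then v + N else v).toNat
def VOK (N : Nat) (v : Int) : Prop := -(N : Int) ≤ v ∧ v < N

theorem VIdx_lt_aux (N : Nat) (i : Int) (h : VOK N i) : VIdx N i < N := by
  rcases h with ⟨h1, h2⟩; unfold VIdx; split <;> omega

theorem pvGetD_bridge {α : Type} (xs : List α) (i : Int) (d : α) (h : VOK xs.length i) :
    PySem.List.pyGetD xs i d = xs.getD (VIdx xs.length i) d := by
  rcases h with ⟨h1, h2⟩
  by_cases hi : 0 ≤ i
  · have hv : VIdx xs.length i = i.toNat := by unfold VIdx; rw [if_neg (by omega)]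
    rw [PySem.List.pyGetD_eq_getElem xs d hi h2, hv, List.getD_eq_getElem _ _ (by omega)]
  · have hk : i = -(((-i).toNat : Nat) : Int) := by omega
    have hv : VIdx xs.length i = xs.length - (-i).toNat := by unfold VIdx; rw [if_pos (by omega)]; omega
    have hg := PySem.List.pyGetD_neg_natCast xs (-i).toNat d (by omega) (by omega)
    rw [← hk] at hg
    rw [hg, hv, List.getD_eq_getElem _ _ (by omega)]

theorem pvIdx_eq {α : Type} (xs : List α) (i : Int) (h : VOK xs.length i) :
    PySem.List.pyIdx? xs.length i = some (VIdx xs.length i) := by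
  rcases h with ⟨h1, h2⟩
  unfold PySem.List.pyIdx? VIdx
  by_cases hi : 0 ≤ i
  · rw [if_pos hi, if_pos h2, if_neg (by omega)]
  · rw [if_neg hi, if_pos h1, if_pos (by omega)]
    congr 1; omega

theorem pvSetD_bridge {α : Type} (xs : List α) (i : Int) (v : α) (h : VOK xs.length i) :
    PySem.List.pySetD xs i v = xs.set (VIdx xs.length i) v := by
  simp only [PySem.List.pySetD, PySem.List.pySet?, pvIdx_eq xs i h, Option.map_some, Option.getD_some]

def EE (tree : List (List Int)) (u v : Int) : Prop := v ∈ tree.getD (VIdx tree.length u) []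
def TreeOK (tree : List (List Int)) : Prop := ∀ l ∈ tree, ∀ v ∈ l, VOK tree.length v
def Wk (tree : List (List Int)) : Nat → Int → Int → Prop
  | 0, u, v => u = v
  | k + 1, u, v => ∃ w, Wk tree k u w ∧ EE tree w v
def RR (tree : List (List Int)) (u v : Int) : Prop := Relation.ReflTransGen (EE tree) u v
def CycR (tree : List (List Int)) : Prop := ∃ v, RR tree 0 v ∧ Relation.TransGen (EE tree) v v

theorem wk_succ_left (tree : List (List Int)) (k : Nat) (u v : Int) :
    Wk tree (k + 1) u v ↔ ∃ w, EE tree u w ∧ Wk tree k w v := by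
  induction k generalizing v with
  | zero =>
    constructor
    · rintro ⟨w, hw, h⟩; cases hw; exact ⟨v, h, rfl⟩
    · rintro ⟨w, h, hw⟩; cases hw; exact ⟨u, rfl, h⟩
  | succ k ih =>
    constructor
    · rintro ⟨w, hw, he⟩
      rcases (ih w).1 hw with ⟨x, hx, hxw⟩
      exact ⟨x, hx, w, hxw, he⟩
    · rintro ⟨w, hw, x, hx, he⟩
      exact ⟨x, (ih x).2 ⟨w, hw, hx⟩, he⟩

theorem wk_comp (tree : List (List Int)) (k1 k2 : Nat) (u v w : Int)
    (h1 : Wk tree k1 u v) (h2 : Wk tree k2 v w) : Wk tree (k1 + k2) u w := by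
  induction k2 generalizing w with
  | zero => cases h2; exact h1
  | succ k ih => rcases h2 with ⟨x, hx, he⟩; exact ⟨x, ih x hx, he⟩

theorem wk_reach (tree : List (List Int)) (k : Nat) (u v : Int) (h : Wk tree k u v) :
    RR tree u v := by
  induction k generalizing v with
  | zero => cases h; exact Relation.ReflTransGen.refl
  | succ k ih => rcases h with ⟨x, hx, he⟩; exact Relation.ReflTransGen.tail (ih x hx) he

theorem wk_trans (tree : List (List Int)) (k : Nat) (u v : Int) (hk : 1 ≤ k)
    (h : Wk tree k u v) : Relation.TransGen (EE tree) u v := by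
  cases k with
  | zero => omega
  | succ k =>
    rcases h with ⟨x, hx, he⟩
    exact Relation.TransGen.tail' (wk_reach tree k u x hx) he

theorem reach_wk (tree : List (List Int)) (u v : Int) (h : RR tree u v) :
    ∃ k, Wk tree k u v := by
  induction h with
  | refl => exact ⟨0, rfl⟩
  | tail _ he ih => rcases ih with ⟨k, hk⟩; exact ⟨k + 1, ⟨_, hk, he⟩⟩

theorem transgen_wk (tree : List (List Int)) (u v : Int) (h : Relation.TransGen (EE tree) u v) :
    ∃ k, 1 ≤ k ∧ Wk tree k u v := by
  induction h with
  | single he => exact ⟨1, le_refl _, ⟨u, rfl, he⟩⟩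
  | tail _ he ih => rcases ih with ⟨k, hk1, hk⟩; exact ⟨k + 1, by omega, ⟨_, hk, he⟩⟩

theorem EE_congr (tree : List (List Int)) (a b w : Int)
    (h : VIdx tree.length a = VIdx tree.length b) : EE tree a w ↔ EE tree b w := by
  unfold EE; rw [h]

theorem EE_valid (tree : List (List Int)) (hok : TreeOK tree) (u v : Int)
    (h : EE tree u v) : VOK tree.length v := by
  unfold EE at h
  by_cases hi : VIdx tree.length u < tree.length
  · exact hok _ (by
      rw [List.getD_eq_getElem _ _ hi]; exact List.getElem_mem hi) v h
  · rw [List.getD_eq_default _ _ (by omega)] at h; cases h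

theorem wk_congr_start (tree : List (List Int)) (k : Nat) (a b v : Int) (hk : 1 ≤ k)
    (h : VIdx tree.length a = VIdx tree.length b) (hw : Wk tree k a v) : Wk tree k b v := by
  cases k with
  | zero => omega
  | succ k =>
    rcases (wk_succ_left tree k a v).1 hw with ⟨w, he, hww⟩
    exact (wk_succ_left tree k b v).2 ⟨w, (EE_congr tree a b w h).1 he, hww⟩

theorem wk_chain (tree : List (List Int)) (k : Nat) (v : Int) (h : Wk tree k 0 v) :
    ∃ f : Nat → Int, f 0 = 0 ∧ f k = v ∧ ∀ j, j < k → EE tree (f j) (f (j + 1)) := by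
  induction k generalizing v with
  | zero => cases h; exact ⟨fun _ => 0, rfl, rfl, by omega⟩
  | succ k ih =>
    rcases h with ⟨w, hw, he⟩
    rcases ih w hw with ⟨f, hf0, hfk, hfe⟩
    refine ⟨fun j => if j = k + 1 then v else f j, ?_, ?_, ?_⟩
    · show (if (0:Nat) = k + 1 then v else f 0) = 0
      rw [if_neg (by omega)]; exact hf0
    · show (if k + 1 = k + 1 then v else f (k + 1)) = v
      rw [if_pos rfl]
    · intro j hj
      show EE tree (if j = k + 1 then v else f j) (if j + 1 = k + 1 then v else f (j + 1))
      by_cases hjk : j = k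
      · subst hjk
        rw [if_neg (by omega), if_pos rfl, hfk]; exact he
      · rw [if_neg (by omega), if_neg (by omega)]; exact hfe j (by omega)

theorem chain_wk (tree : List (List Int)) (k : Nat) (f : Nat → Int)
    (hf : ∀ j, j < k → EE tree (f j) (f (j + 1))) :
    ∀ i j, i ≤ j → j ≤ k → Wk tree (j - i) (f i) (f j) := by
  intro i j hij hjk
  induction j with
  | zero => have : i = 0 := by omega
            subst this; exact rfl
  | succ j ih =>
    by_cases hj : i = j + 1
    · subst hj; rw [Nat.sub_self]; exact rfl
    · have h1 : j + 1 - i = (j - i) + 1 := by omega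
      rw [h1]
      exact ⟨f j, ih (by omega) (by omega), hf j (by omega)⟩

theorem cyc_long_walk (tree : List (List Int)) (h : CycR tree) (m : Nat) :
    ∃ v, Wk tree m 0 v := by
  rcases h with ⟨c, hr, ht⟩
  rcases reach_wk tree 0 c hr with ⟨a, ha⟩
  rcases transgen_wk tree c c ht with ⟨b, hb1, hb⟩
  -- walk of length a + m*b from 0 to c
  have hloop : ∀ t : Nat, Wk tree (a + t * b) 0 c := by
    intro t; induction t with
    | zero => simpa using ha
    | succ t ih =>
      have := wk_comp tree (a + t * b) b 0 c c ih hb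
      have he : a + t * b + b = a + (t + 1) * b := by ring
      rwa [he] at this
  have hlong := hloop m
  have hm : m ≤ a + m * b := by nlinarith
  -- peel the walk down to length m
  have peel : ∀ j v, Wk tree j 0 v → ∀ i, i ≤ j → ∃ w, Wk tree i 0 w := by
    intro j
    induction j with
    | zero => intro v hv i hi; exact ⟨v, by have : i = 0 := by omega
                                            subst this; exact hv⟩
    | succ j ih =>
      intro v hv i hi
      rcases hv with ⟨w, hw, _⟩
      by_cases hij : i = j + 1
      · exact ⟨v, by subst hij; exact ⟨w, hw, by assumption⟩⟩
      · exact ih w hw i (by omega)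
  exact peel _ c hlong m hm

def UC (l : List Int) : Nat := ((Finset.range l.length).filter (fun i => l.getD i 0 = 0)).card
def TC (l : List Int) : Nat := ((Finset.range l.length).filter (fun i => ¬ (l.getD i 0 = 0))).card

theorem getD_set_eq (l : List Int) (i : Nat) (v : Int) (h : i < l.length) :
    (l.set i v).getD i 0 = v := by
  rw [List.getD_eq_getElem _ _ (by simpa using h)]
  simp

theorem getD_set_ne (l : List Int) (i j : Nat) (v : Int) (h : j ≠ i) :
    (l.set i v).getD j 0 = l.getD j 0 := by
  by_cases hj : j < l.length
  · rw [List.getD_eq_getElem _ _ (by simpa using hj), List.getD_eq_getElem _ _ hj]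
    rw [List.getElem_set]
    rw [if_neg (by omega)]
  · rw [List.getD_eq_default _ _ (by simpa using hj), List.getD_eq_default _ _ (by omega)]

theorem UC_set_one (l : List Int) (i : Nat) (hi : i < l.length) (h0 : l.getD i 0 = 0) :
    UC (l.set i 1) + 1 = UC l := by
  unfold UC
  rw [List.getD_eq_getElem _ _ hi] at h0
  have hlen : (l.set i 1).length = l.length := by simp
  rw [hlen]
  have hfe : (Finset.range l.length).filter (fun j => (l.set i 1).getD j 0 = 0)
      = ((Finset.range l.length).filter (fun j => l.getD j 0 = 0)).erase i := by
    ext j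
    simp only [Finset.mem_erase, Finset.mem_filter, Finset.mem_range]
    constructor
    · intro ⟨hj, hjs⟩
      by_cases hij : j = i
      · subst hij; rw [getD_set_eq l j 1 hi] at hjs; omega
      · rw [getD_set_ne l i j 1 hij] at hjs; exact ⟨hij, hj, hjs⟩
    · intro ⟨hij, hj, hjs⟩
      rw [getD_set_ne l i j 1 hij]; exact ⟨hj, hjs⟩
  rw [hfe]
  have hmem : i ∈ (Finset.range l.length).filter (fun j => l.getD j 0 = 0) := by
    simp [Finset.mem_filter, hi, h0]
  rw [Finset.card_erase_of_mem hmem]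
  have : 1 ≤ ((Finset.range l.length).filter (fun j => l.getD j 0 = 0)).card :=
    Finset.card_pos.2 ⟨i, hmem⟩
  omega

theorem TC_set_one (l : List Int) (i : Nat) (hi : i < l.length) (h0 : l.getD i 0 = 0) :
    TC (l.set i 1) = TC l + 1 := by
  unfold TC
  rw [List.getD_eq_getElem _ _ hi] at h0
  have hlen : (l.set i 1).length = l.length := by simp
  rw [hlen]
  have hfe : (Finset.range l.length).filter (fun j => ¬ ((l.set i 1).getD j 0 = 0))
      = insert i ((Finset.range l.length).filter (fun j => ¬ (l.getD j 0 = 0))) := by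
    ext j
    simp only [Finset.mem_insert, Finset.mem_filter, Finset.mem_range]
    constructor
    · intro ⟨hj, hjs⟩
      by_cases hij : j = i
      · exact Or.inl hij
      · rw [getD_set_ne l i j 1 hij] at hjs; exact Or.inr ⟨hj, hjs⟩
    · intro hh
      rcases hh with hij | ⟨hj, hjs⟩
      · subst hij; rw [getD_set_eq l j 1 hi]; exact ⟨hi, by omega⟩
      · by_cases hij : j = i
        · subst hij; rw [getD_set_eq l j 1 hi]; exact ⟨hj, by omega⟩
        · rw [getD_set_ne l i j 1 hij]; exact ⟨hj, hjs⟩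
  rw [hfe, Finset.card_insert_of_notMem (by simp [Finset.mem_filter, List.getElem?_eq_getElem hi, h0])]

theorem UC_mono (l l' : List Int) (hlen : l'.length = l.length)
    (h : ∀ i : Nat, l.getD i 0 ≠ 0 → l'.getD i 0 ≠ 0) : UC l' ≤ UC l := by
  unfold UC
  rw [hlen]
  apply Finset.card_le_card
  intro j hj
  simp only [Finset.mem_filter, Finset.mem_range] at *
  refine ⟨hj.1, ?_⟩
  by_contra hc
  exact (h j hc) hj.2

theorem UC_replicate (L : Nat) : UC (List.replicate L (0 : Int)) = L := by
  unfold UC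
  have : ∀ j ∈ Finset.range L, (List.replicate L (0 : Int)).getD j 0 = 0 := by
    intro j hj
    simp only [Finset.mem_range] at hj
    rw [List.getD_eq_getElem _ _ (by simpa using hj)]
    simp
  rw [List.length_replicate, Finset.filter_true_of_mem this, Finset.card_range]

theorem walk_seen (tree : List (List Int)) (hok : TreeOK tree) (hN : 0 < tree.length)
    (seen : List Int)
    (hclosed : ∀ i, i < tree.length → seen.getD i 0 ≠ 0 →
      ∀ w ∈ tree.getD i [], seen.getD (VIdx tree.length w) 0 ≠ 0)
    (h0 : seen.getD (VIdx tree.length 0) 0 ≠ 0) :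
    ∀ k v, Wk tree k 0 v → VOK tree.length v ∧ seen.getD (VIdx tree.length v) 0 ≠ 0 := by
  intro k
  induction k with
  | zero =>
    intro v hv; cases hv
    exact ⟨⟨by omega, by exact_mod_cast hN⟩, h0⟩
  | succ k ih =>
    intro v hv
    rcases hv with ⟨w, hw, he⟩
    rcases ih w hw with ⟨hwok, hwseen⟩
    refine ⟨EE_valid tree hok w v he, ?_⟩
    exact hclosed (VIdx tree.length w) (VIdx_lt_aux tree.length w hwok) hwseen v he

theorem pigeon_aux (tree : List (List Int)) (k : Nat) (f : Nat → Int)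
    (hfe : ∀ j, j < k → EE tree (f j) (f (j + 1)))
    (hWkj : ∀ j, j ≤ k → Wk tree j 0 (f j))
    (i j : Nat) (hij : i < j) (hj : j ≤ k)
    (heq : VIdx tree.length (f i) = VIdx tree.length (f j)) : CycR tree := by
  have hm : Wk tree (j - i) (f i) (f j) := chain_wk tree k f hfe i j (by omega) hj
  have hc : Wk tree (j - i) (f j) (f j) :=
    wk_congr_start tree (j - i) (f i) (f j) (f j) (by omega) heq hm
  exact ⟨f j, wk_reach tree j 0 (f j) (hWkj j hj),
    wk_trans tree (j - i) (f j) (f j) (by omega) hc⟩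

theorem pigeon (tree : List (List Int)) (hok : TreeOK tree) (hN : 0 < tree.length)
    (seen : List Int) (hlen : seen.length = tree.length)
    (hclosed : ∀ i, i < tree.length → seen.getD i 0 ≠ 0 →
      ∀ w ∈ tree.getD i [], seen.getD (VIdx tree.length w) 0 ≠ 0)
    (h0 : seen.getD (VIdx tree.length 0) 0 ≠ 0)
    (v : Int) (h : Wk tree (TC seen) 0 v) : CycR tree := by
  rcases wk_chain tree (TC seen) v h with ⟨f, hf0, hfv, hfe⟩
  have hWkj : ∀ j, j ≤ TC seen → Wk tree j 0 (f j) := by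
    intro j hj
    have := chain_wk tree (TC seen) f hfe 0 j (Nat.zero_le _) hj
    rw [hf0] at this
    simpa using this
  have hmaps : ∀ j : Fin (TC seen + 1), VIdx tree.length (f j.val) ∈
      (Finset.range tree.length).filter (fun i => ¬ (seen.getD i 0 = 0)) := by
    intro j
    have hj := walk_seen tree hok hN seen hclosed h0 j.val (f j.val) (hWkj j.val (by omega))
    simp only [Finset.mem_filter, Finset.mem_range]
    exact ⟨VIdx_lt_aux tree.length _ hj.1, hj.2⟩
  have hcard : ((Finset.range tree.length).filter (fun i => ¬ (seen.getD i 0 = 0))).card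
      < (Finset.univ : Finset (Fin (TC seen + 1))).card := by
    rw [Finset.card_univ, Fintype.card_fin]
    have : ((Finset.range tree.length).filter (fun i => ¬ (seen.getD i 0 = 0))).card = TC seen := by
      unfold TC; rw [hlen]
    omega
  rcases Finset.exists_ne_map_eq_of_card_lt_of_maps_to hcard (fun j _ => hmaps j)
    with ⟨x, _, y, _, hxy, hgxy⟩
  -- order the two positions
  rcases Ne.lt_or_gt hxy with hlt | hgt
  case _ =>
    exact pigeon_aux tree (TC seen) f hfe hWkj x.val y.val hlt (by omega) hgxy
  case _ =>
    exact pigeon_aux tree (TC seen) f hfe hWkj y.val x.val hgt (by omega) hgxy.symm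

theorem mem_pvStep (tree : List (List Int)) (hok : TreeOK tree) (fr : List Int)
    (hfr : ∀ u ∈ fr, VOK tree.length u) (w : Int) :
    w ∈ pvStep tree fr ↔ ∃ u ∈ fr, EE tree u w := by
  unfold pvStep
  rw [PySem.Set.mem_ofList, List.mem_flatMap]
  constructor
  · rintro ⟨u, hu, hw⟩
    rw [pvGetD_bridge tree u [] (hfr u hu)] at hw
    exact ⟨u, hu, hw⟩
  · rintro ⟨u, hu, hw⟩
    refine ⟨u, hu, ?_⟩
    rw [pvGetD_bridge tree u [] (hfr u hu)]
    exact hw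

theorem pvStep_ok (tree : List (List Int)) (hok : TreeOK tree) (fr : List Int)
    (hfr : ∀ u ∈ fr, VOK tree.length u) :
    ∀ w ∈ pvStep tree fr, VOK tree.length w := by
  intro w hw
  rcases (mem_pvStep tree hok fr hfr w).1 hw with ⟨u, _, he⟩
  exact EE_valid tree hok u w he

theorem mem_pvFrontier (tree : List (List Int)) (hok : TreeOK tree) :
    ∀ (k : Nat) (fr : List Int), (∀ u ∈ fr, VOK tree.length u) →
      ∀ v : Int, (v ∈ pvFrontier k tree fr ↔ ∃ u ∈ fr, Wk tree k u v) := by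
  intro k
  induction k with
  | zero =>
    intro fr _ v
    constructor
    · intro hv; exact ⟨v, hv, rfl⟩
    · rintro ⟨u, hu, hw⟩; cases hw; exact hu
  | succ k ih =>
    intro fr hfr v
    show v ∈ (if fr.isEmpty then fr else pvFrontier k tree (pvStep tree fr)) ↔ _
    by_cases hemp : fr.isEmpty
    · rw [if_pos hemp]
      rw [List.isEmpty_iff] at hemp
      subst hemp
      simp
    · rw [if_neg hemp]
      rw [ih (pvStep tree fr) (pvStep_ok tree hok fr hfr)]
      constructor
      · rintro ⟨w, hw, hwk⟩
        rcases (mem_pvStep tree hok fr hfr w).1 hw with ⟨u, hu, he⟩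
        exact ⟨u, hu, (wk_succ_left tree k u v).2 ⟨w, he, hwk⟩⟩
      · rintro ⟨u, hu, hwk⟩
        rcases (wk_succ_left tree k u v).1 hwk with ⟨w, he, hwk'⟩
        exact ⟨w, (mem_pvStep tree hok fr hfr w).2 ⟨u, hu, he⟩, hwk'⟩

def pvRStep : List Int × List Int × Int → Int → List Int × List Int × Int :=
  fun st w =>
    if PySem.List.pyGetD st.2.1 w 0 = 0 then
      (w :: st.1, PySem.List.pySetD st.2.1 w 1, st.2.2 + 1)
    else st

theorem pvRStep_eq (sk sn : List Int) (c : Int) (w : Int) :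
    pvRStep (sk, sn, c) w =
      if PySem.List.pyGetD sn w 0 = 0 then (w :: sk, PySem.List.pySetD sn w 1, c + 1)
      else (sk, sn, c) := rfl

theorem reach_fold (N : Nat) :
    ∀ (ws : List Int), (∀ w ∈ ws, VOK N w) →
    ∀ (sk sn : List Int) (c : Int) (r : List Int × List Int × Int),
      r = ws.foldl pvRStep (sk, sn, c) →
      sn.length = N → (∀ v ∈ sk, VOK N v) → c = (TC sn : Int) →
      (r.2.1.length = N ∧ (∀ v ∈ r.1, VOK N v) ∧
       (∀ i : Nat, sn.getD i 0 ≠ 0 → r.2.1.getD i 0 ≠ 0) ∧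
       (∀ w ∈ ws, r.2.1.getD (VIdx N w) 0 ≠ 0) ∧
       (∀ v ∈ sk, v ∈ r.1) ∧
       (∀ i : Nat, r.2.1.getD i 0 ≠ 0 → sn.getD i 0 ≠ 0 ∨ ∃ v ∈ r.1, VIdx N v = i) ∧
       r.2.2 = (TC r.2.1 : Int) ∧
       r.1.length + UC r.2.1 = sk.length + UC sn) := by
  intro ws
  induction ws with
  | nil =>
    intro _ sk sn c r hr hlen hsk hc
    subst hr
    exact ⟨hlen, hsk, fun _ h => h, by simp, fun v hv => hv, fun i h => Or.inl h, hc, rfl⟩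
  | cons w ws ih =>
    intro hws sk sn c r hr hlen hsk hc
    have hwok : VOK N w := hws w (List.mem_cons_self)
    have hwok' : VOK sn.length w := by rw [hlen]; exact hwok
    rw [List.foldl_cons, pvRStep_eq, pvGetD_bridge sn w 0 hwok'] at hr
    by_cases hw : sn.getD (VIdx sn.length w) 0 = 0
    · rw [if_pos hw, pvSetD_bridge sn w 1 hwok'] at hr
      have hVeq : VIdx sn.length w = VIdx N w := by rw [hlen]
      rw [hVeq] at hw hr
      have hvlt : VIdx N w < N := VIdx_lt_aux N w hwok
      have hlen' : (sn.set (VIdx N w) 1).length = N := by simp [hlen]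
      have hr' := ih (fun x hx => hws x (List.mem_cons_of_mem w hx))
        (w :: sk) (sn.set (VIdx N w) 1) (c + 1) r hr hlen'
        (by intro v hv; rcases List.mem_cons.1 hv with rfl | hv
            · exact hwok
            · exact hsk v hv)
        (by rw [hc, TC_set_one sn (VIdx N w) (by omega) hw]; push_cast; ring)
      rcases hr' with ⟨h1, h2, h3, h4, h5, h6, h7, h8⟩
      refine ⟨h1, h2, ?_, ?_, ?_, ?_, h7, ?_⟩
      · intro i hi
        apply h3
        by_cases hiw : i = VIdx N w
        · subst hiw; rw [getD_set_eq sn _ 1 (by omega)]; omega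
        · rw [getD_set_ne sn _ i 1 hiw]; exact hi
      · intro x hx
        rcases List.mem_cons.1 hx with rfl | hx
        · apply h3; rw [getD_set_eq sn _ 1 (by omega)]; omega
        · exact h4 x hx
      · intro v hv; exact h5 v (List.mem_cons_of_mem w hv)
      · intro i hi
        rcases h6 i hi with hsn | hpend
        · by_cases hiw : i = VIdx N w
          · subst hiw; exact Or.inr ⟨w, h5 w List.mem_cons_self, rfl⟩
          · rw [getD_set_ne sn _ i 1 hiw] at hsn; exact Or.inl hsn
        · exact Or.inr hpend
      · have huc := UC_set_one sn (VIdx N w) (by omega) hw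
        have hsklen : (w :: sk).length = sk.length + 1 := by simp
        omega
    · rw [if_neg hw] at hr
      have hr' := ih (fun x hx => hws x (List.mem_cons_of_mem w hx)) sk sn c r hr hlen hsk hc
      rcases hr' with ⟨h1, h2, h3, h4, h5, h6, h7, h8⟩
      refine ⟨h1, h2, h3, ?_, h5, h6, h7, h8⟩
      intro x hx
      rcases List.mem_cons.1 hx with rfl | hx
      · apply h3; rw [← hlen]; exact hw
      · exact h4 x hx

theorem reach_main (tree : List (List Int)) (hok : TreeOK tree) :
    ∀ (fuel : Nat) (stack : List Int) (seen : List Int) (cnt : Int),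
      seen.length = tree.length →
      stack.length + UC seen ≤ fuel →
      (∀ v ∈ stack, VOK tree.length v) →
      (∀ i, i < tree.length → seen.getD i 0 ≠ 0 →
        (∃ v ∈ stack, VIdx tree.length v = i) ∨
        (∀ w ∈ tree.getD i [], seen.getD (VIdx tree.length w) 0 ≠ 0)) →
      cnt = (TC seen : Int) →
      ((pvReach fuel tree stack seen cnt).1.length = tree.length ∧
       (∀ i : Nat, seen.getD i 0 ≠ 0 → (pvReach fuel tree stack seen cnt).1.getD i 0 ≠ 0) ∧
       (∀ i, i < tree.length → (pvReach fuel tree stack seen cnt).1.getD i 0 ≠ 0 →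
         ∀ w ∈ tree.getD i [], (pvReach fuel tree stack seen cnt).1.getD (VIdx tree.length w) 0 ≠ 0) ∧
       (pvReach fuel tree stack seen cnt).2 = (TC (pvReach fuel tree stack seen cnt).1 : Int)) := by
  intro fuel
  induction fuel with
  | zero =>
    intro stack seen cnt hlen hfuel hstk hinv hc
    have hstack : stack = [] := by
      cases stack with
      | nil => rfl
      | cons v stk => simp at hfuel
    subst hstack
    refine ⟨hlen, fun _ h => h, ?_, hc⟩
    intro i hi hseen w hw
    rcases hinv i hi hseen with ⟨v, hv, _⟩ | hcl
    · cases hv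
    · exact hcl w hw
  | succ fuel ih =>
    intro stack seen cnt hlen hfuel hstk hinv hc
    cases stack with
    | nil =>
      refine ⟨hlen, fun _ h => h, ?_, hc⟩
      intro i hi hseen w hw
      rcases hinv i hi hseen with ⟨v, hv, _⟩ | hcl
      · cases hv
      · exact hcl w hw
    | cons v stk =>
      have hvok : VOK tree.length v := hstk v (List.mem_cons_self)
      have hws : ∀ w ∈ PySem.List.pyGetD tree v [], VOK tree.length w := by
        rw [pvGetD_bridge tree v [] hvok]
        intro w hw
        exact EE_valid tree hok v w hw
      have hfold := reach_fold tree.length (PySem.List.pyGetD tree v []) hws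
        stk seen cnt _ rfl hlen (fun x hx => hstk x (List.mem_cons_of_mem v hx)) hc
      rcases hfold with ⟨h1, h2, h3, h4, h5, h6, h7, h8⟩
      have hred : pvReach (fuel + 1) tree (v :: stk) seen cnt =
          pvReach fuel tree
            (List.foldl pvRStep (stk, seen, cnt) (PySem.List.pyGetD tree v [])).1
            (List.foldl pvRStep (stk, seen, cnt) (PySem.List.pyGetD tree v [])).2.1
            (List.foldl pvRStep (stk, seen, cnt) (PySem.List.pyGetD tree v [])).2.2 := rfl
      rw [hred]
      have hres := ih _ _ _ h1
        (by simp only [List.length_cons] at hfuel; omega)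
        h2
        (by
          intro i hi hseen
          rcases h6 i hseen with hold | ⟨x, hx, hxi⟩
          · rcases hinv i hi hold with ⟨y, hy, hyi⟩ | hcl
            · rcases List.mem_cons.1 hy with rfl | hy
              · -- i is v's slot: all successors were marked by the fold
                right
                intro w hw
                subst hyi
                apply h4
                rw [pvGetD_bridge tree y [] hvok]
                exact hw
              · exact Or.inl ⟨y, h5 y hy, hyi⟩
            · exact Or.inr (fun w hw => h3 _ (hcl w hw))
          · exact Or.inl ⟨x, hx, hxi⟩)
        h7
      exact ⟨hres.1, fun i hi => hres.2.1 i (h3 i hi), hres.2.2.1, hres.2.2.2⟩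

def GrayP (N : Nat) (vis : List Int) (v : Int) : Prop := vis.getD (VIdx N v) 0 ≠ 0
def BlackP (N : Nat) (vis chk : List Int) (v : Int) : Prop :=
  chk.getD (VIdx N v) 0 ≠ 0 ∧ vis.getD (VIdx N v) 0 = 0

def StInv (tree : List (List Int)) (vis chk : List Int) : Prop :=
  vis.length = tree.length ∧ chk.length = tree.length ∧
  (∀ v : Int, GrayP tree.length vis v → chk.getD (VIdx tree.length v) 0 ≠ 0) ∧
  (∀ b : Int, VOK tree.length b → BlackP tree.length vis chk b →
    ∀ w : Int, EE tree b w → BlackP tree.length vis chk w) ∧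
  (∀ b : Int, VOK tree.length b → BlackP tree.length vis chk b →
    ∀ v : Int, RR tree b v → ¬ Relation.TransGen (EE tree) v v)

theorem black_reach (tree : List (List Int)) (hok : TreeOK tree) (vis chk : List Int)
    (hcl : ∀ b : Int, VOK tree.length b → BlackP tree.length vis chk b →
      ∀ w : Int, EE tree b w → BlackP tree.length vis chk w) :
    ∀ b v : Int, VOK tree.length b → BlackP tree.length vis chk b → RR tree b v →
      VOK tree.length v ∧ BlackP tree.length vis chk v := by
  intro b v hb hbl hr
  induction hr with
  | refl => exact ⟨hb, hbl⟩
  | tail hrr he ih =>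
    rcases ih with ⟨hwok, hwbl⟩
    exact ⟨EE_valid tree hok _ _ he, hcl _ hwok hwbl _ he⟩


def DfsSpec (tree : List (List Int)) (fuel : Nat) : Prop :=
  ∀ (s : Int) (vis chk : List Int),
    StInv tree vis chk → VOK tree.length s →
    chk.getD (VIdx tree.length s) 0 = 0 →
    (∀ g : Int, VOK tree.length g → GrayP tree.length vis g →
      ∃ g', VIdx tree.length g' = VIdx tree.length g ∧ RR tree g' s) →
    RR tree 0 s → UC chk < fuel →
    ((pvDfs fuel tree s vis chk).1 = true → CycR tree) ∧
    ((pvDfs fuel tree s vis chk).1 = false →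
      StInv tree (pvDfs fuel tree s vis chk).2.1 (pvDfs fuel tree s vis chk).2.2 ∧
      (∀ i : Nat, (pvDfs fuel tree s vis chk).2.1.getD i 0 = vis.getD i 0) ∧
      (∀ i : Nat, chk.getD i 0 ≠ 0 → (pvDfs fuel tree s vis chk).2.2.getD i 0 ≠ 0) ∧
      (pvDfs fuel tree s vis chk).2.2.getD (VIdx tree.length s) 0 ≠ 0)

theorem go_spec (tree : List (List Int)) (hok : TreeOK tree) (fuel : Nat)
    (hdfs : DfsSpec tree fuel) :
    ∀ (succs : List Int) (s : Int) (vis chk : List Int),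
      StInv tree vis chk → VOK tree.length s →
      (∀ x ∈ succs, EE tree s x) →
      (∀ x ∈ tree.getD (VIdx tree.length s) [], x ∈ succs ∨ BlackP tree.length vis chk x) →
      vis.getD (VIdx tree.length s) 0 ≠ 0 →
      chk.getD (VIdx tree.length s) 0 ≠ 0 →
      (∀ g : Int, VOK tree.length g → GrayP tree.length vis g →
        ∃ g', VIdx tree.length g' = VIdx tree.length g ∧ RR tree g' s) →
      RR tree 0 s → UC chk < fuel →
      ((pvGo fuel tree s succs vis chk).1 = true → CycR tree) ∧
      ((pvGo fuel tree s succs vis chk).1 = false →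
        StInv tree (pvGo fuel tree s succs vis chk).2.1 (pvGo fuel tree s succs vis chk).2.2 ∧
        (∀ i : Nat, (pvGo fuel tree s succs vis chk).2.1.getD i 0 =
          (vis.set (VIdx tree.length s) 0).getD i 0) ∧
        (∀ i : Nat, chk.getD i 0 ≠ 0 → (pvGo fuel tree s succs vis chk).2.2.getD i 0 ≠ 0)) := by
  intro succs
  induction succs with
  | nil =>
    intro s vis chk hinv hsok _ hproc hgray hchks hgr hr0 hfuel
    rcases hinv with ⟨hvl, hcl, hgc, hbc, hbs⟩
    have hslt : VIdx tree.length s < tree.length := VIdx_lt_aux tree.length s hsok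
    have hbr : pvGo fuel tree s [] vis chk = (false, PySem.List.pySetD vis s 0, chk) := by
      simp only [pvGo]
    rw [hbr]
    have hset : PySem.List.pySetD vis s 0 = vis.set (VIdx tree.length s) 0 := by
      have := pvSetD_bridge vis s (0 : Int) (by rw [hvl]; exact hsok)
      rw [this, hvl]
    rw [hset]
    refine ⟨(fun h => nomatch h), fun _ => ?_⟩
    -- facts about the new state
    have hvl' : (vis.set (VIdx tree.length s) 0).length = tree.length := by simp [hvl]
    have hgetset : ∀ i : Nat, (vis.set (VIdx tree.length s) 0).getD i 0 =
        if i = VIdx tree.length s then 0 else vis.getD i 0 := by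
      intro i
      by_cases hi : i = VIdx tree.length s
      · subst hi; rw [if_pos rfl, getD_set_eq vis _ 0 (by omega)]
      · rw [if_neg hi, getD_set_ne vis _ i 0 hi]
    -- all successors of s are black in the old state
    have hsblack : ∀ x ∈ tree.getD (VIdx tree.length s) [], BlackP tree.length vis chk x := by
      intro x hx
      rcases hproc x hx with h | h
      · cases h
      · exact h
    -- new black predicate
    have hnb : ∀ x : Int, BlackP tree.length (vis.set (VIdx tree.length s) 0) chk x ↔
        (BlackP tree.length vis chk x ∨
          (VIdx tree.length x = VIdx tree.length s ∧ chk.getD (VIdx tree.length s) 0 ≠ 0)) := by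
      intro x
      unfold BlackP
      rw [hgetset]
      by_cases hx : VIdx tree.length x = VIdx tree.length s
      · rw [if_pos hx, hx]
        constructor
        · intro ⟨h1, _⟩; exact Or.inr ⟨rfl, h1⟩
        · intro h
          rcases h with ⟨h1, h2⟩ | ⟨_, h2⟩
          · exact ⟨h2 ▸ h1, rfl⟩
          · exact ⟨h2, rfl⟩
      · rw [if_neg hx]
        constructor
        · intro h; exact Or.inl h
        · intro h
          rcases h with h | ⟨h1, _⟩
          · exact h
          · exact absurd h1 hx
    -- old blacks do not sit on s's slot
    have hob : ∀ x : Int, BlackP tree.length vis chk x → VIdx tree.length x ≠ VIdx tree.length s := by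
      intro x hx heq
      rcases hx with ⟨_, h2⟩
      rw [heq] at h2
      exact hgray h2
    -- ¬ TransGen x x for x on s's slot
    have hnocyc_s : ∀ x : Int, VIdx tree.length x = VIdx tree.length s →
        ¬ Relation.TransGen (EE tree) x x := by
      intro x hxs ht
      rcases transgen_wk tree x x ht with ⟨k, hk1, hk⟩
      rcases (wk_succ_left tree (k - 1) x x).1 (by
        have : k - 1 + 1 = k := by omega
        rw [this]; exact hk) with ⟨w, he, hw⟩
      have hew : EE tree s w := (EE_congr tree x s w hxs).1 he
      have hwb : BlackP tree.length vis chk w := hsblack w hew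
      have hwok : VOK tree.length w := EE_valid tree hok s w hew
      have hxb := black_reach tree hok vis chk hbc w x hwok hwb (wk_reach tree _ w x hw)
      exact (hob x hxb.2) hxs
    refine ⟨⟨by simpa using hvl, hcl, ?_, ?_, ?_⟩, fun i => rfl, fun _ h => h⟩
    · -- gray ⊆ chk in the new state
      intro v hv
      unfold GrayP at hv
      rw [hgetset] at hv
      by_cases hvs : VIdx tree.length v = VIdx tree.length s
      · rw [if_pos hvs] at hv; omega
      · rw [if_neg hvs] at hv; exact hgc v hv
    · -- black closure in the new state
      intro b hbok hb w hew
      have hwok : VOK tree.length w := EE_valid tree hok b w hew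
      rcases (hnb b).1 hb with hbold | ⟨hbs', _⟩
      · have := hbc b hbok hbold w hew
        exact (hnb w).2 (Or.inl this)
      · have hesw : EE tree s w := (EE_congr tree b s w hbs').1 hew
        exact (hnb w).2 (Or.inl (hsblack w hesw))
    · -- black safety in the new state
      intro b hbok hb v hrv ht
      rcases (hnb b).1 hb with hbold | ⟨hbs', _⟩
      · exact hbs b hbok hbold v hrv ht
      · -- b sits on s's slot
        rcases (Relation.reflTransGen_iff_eq_or_transGen.1 hrv) with heq | htbv
        · subst heq; exact hnocyc_s v hbs' ht
        · rcases transgen_wk tree b v htbv with ⟨k, hk1, hk⟩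
          rcases (wk_succ_left tree (k - 1) b v).1 (by
            have : k - 1 + 1 = k := by omega
            rw [this]; exact hk) with ⟨w, he, hw⟩
          have hew : EE tree s w := (EE_congr tree b s w hbs').1 he
          have hwb : BlackP tree.length vis chk w := hsblack w hew
          have hwok : VOK tree.length w := EE_valid tree hok s w hew
          exact hbs w hwok hwb v (wk_reach tree _ w v hw) ht
  | cons nxt rest ih =>
    intro s vis chk hinv hsok hsucc hproc hviss hchks hgrays hr0 hfuel
    have hinv' := hinv
    rcases hinv' with ⟨hvl, hcl, hgc, hbc, hbs⟩
    have henxt : EE tree s nxt := hsucc nxt List.mem_cons_self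
    have hnok : VOK tree.length nxt := EE_valid tree hok s nxt henxt
    have hnlt : VIdx tree.length nxt < tree.length := VIdx_lt_aux tree.length nxt hnok
    have hchkb : PySem.List.pyGetD chk nxt 0 = chk.getD (VIdx tree.length nxt) 0 := by
      have := pvGetD_bridge chk nxt 0 (by rw [hcl]; exact hnok)
      rw [this, hcl]
    have hvisb : PySem.List.pyGetD vis nxt 0 = vis.getD (VIdx tree.length nxt) 0 := by
      have := pvGetD_bridge vis nxt 0 (by rw [hvl]; exact hnok)
      rw [this, hvl]
    by_cases hchk : chk.getD (VIdx tree.length nxt) 0 = 0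
    · -- nxt unchecked: recurse
      have hd := hdfs nxt vis chk hinv hnok hchk
        (by
          intro g hgok hgray
          rcases hgrays g hgok hgray with ⟨g', hg1, hg2⟩
          exact ⟨g', hg1, Relation.ReflTransGen.tail hg2 henxt⟩)
        (Relation.ReflTransGen.tail hr0 henxt) hfuel
      rcases hd with ⟨hdt, hdf⟩
      by_cases hrt : (pvDfs fuel tree nxt vis chk).1 = true
      · have hbr : pvGo fuel tree s (nxt :: rest) vis chk = pvDfs fuel tree nxt vis chk := by
          simp only [pvGo]
          rw [if_pos (by rw [hchkb]; exact hchk), if_pos hrt]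
        rw [hbr]
        refine ⟨fun _ => hdt hrt, fun hf => ?_⟩
        rw [hrt] at hf; cases hf
      · have hrf : (pvDfs fuel tree nxt vis chk).1 = false := by
          cases h : (pvDfs fuel tree nxt vis chk).1
          · rfl
          · exact absurd h hrt
        rcases hdf hrf with ⟨hinv2, hvis2, hchk2, hchknxt2⟩
        have hinv2' := hinv2
        rcases hinv2' with ⟨hvl2, hcl2, hgc2, hbc2, hbs2⟩
        -- the visited check on nxt fails: vis is restored and nxt was not gray
        have hvnxt : vis.getD (VIdx tree.length nxt) 0 = 0 := by
          by_contra hc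
          exact (hgc nxt hc) hchk
        have hvisb2 : PySem.List.pyGetD (pvDfs fuel tree nxt vis chk).2.1 nxt 0 =
            (pvDfs fuel tree nxt vis chk).2.1.getD (VIdx tree.length nxt) 0 := by
          have := pvGetD_bridge (pvDfs fuel tree nxt vis chk).2.1 nxt 0 (by rw [hvl2]; exact hnok)
          rw [this, hvl2]
        have hvcheck : ¬ (PySem.List.pyGetD (pvDfs fuel tree nxt vis chk).2.1 nxt 0 ≠ 0) := by
          rw [hvisb2, hvis2 (VIdx tree.length nxt), hvnxt]
          simp
        have hbr : pvGo fuel tree s (nxt :: rest) vis chk =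
            pvGo fuel tree s rest (pvDfs fuel tree nxt vis chk).2.1 (pvDfs fuel tree nxt vis chk).2.2 := by
          simp only [pvGo]
          rw [if_pos (by rw [hchkb]; exact hchk), if_neg (by rw [hrf]; simp), if_neg hvcheck]
        rw [hbr]
        -- continue with the remaining siblings from the returned state
        have hih := ih s (pvDfs fuel tree nxt vis chk).2.1 (pvDfs fuel tree nxt vis chk).2.2
          hinv2 hsok
          (fun x hx => hsucc x (List.mem_cons_of_mem nxt hx))
          (by
            intro x hx
            rcases hproc x hx with hx' | hxb
            · rcases List.mem_cons.1 hx' with rfl | hx''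
              · right
                refine ⟨hchknxt2, ?_⟩
                rw [hvis2 (VIdx tree.length x)]
                exact hvnxt
              · exact Or.inl hx''
            · right
              rcases hxb with ⟨hb1, hb2⟩
              refine ⟨hchk2 _ hb1, ?_⟩
              rw [hvis2 _]
              exact hb2)
          (by rw [hvis2 _]; exact hviss)
          (hchk2 _ hchks)
          (by
            intro g hgok hgray
            unfold GrayP at hgray
            rw [hvis2 _] at hgray
            exact hgrays g hgok hgray)
          hr0
          (by
            have hle := UC_mono chk (pvDfs fuel tree nxt vis chk).2.2 (by rw [hcl2, hcl]) hchk2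
            omega)
        rcases hih with ⟨hih1, hih2⟩
        refine ⟨hih1, fun hf => ?_⟩
        rcases hih2 hf with ⟨hinv3, hvis3, hchk3⟩
        refine ⟨hinv3, ?_, fun i hi => hchk3 i (hchk2 i hi)⟩
        intro i
        rw [hvis3 i]
        by_cases his : i = VIdx tree.length s
        · subst his
          rw [getD_set_eq _ _ 0 (by rw [hvl2]; exact VIdx_lt_aux tree.length s hsok),
            getD_set_eq _ _ 0 (by rw [hvl]; exact VIdx_lt_aux tree.length s hsok)]
        · rw [getD_set_ne _ _ i 0 his, getD_set_ne _ _ i 0 his]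
          exact hvis2 i
    · -- nxt already checked
      by_cases hvis : vis.getD (VIdx tree.length nxt) 0 ≠ 0
      · have hbr : pvGo fuel tree s (nxt :: rest) vis chk = (true, vis, chk) := by
          simp only [pvGo]
          rw [if_neg (by rw [hchkb]; exact hchk), if_pos (by rw [hvisb]; exact hvis)]
        rw [hbr]
        refine ⟨fun _ => ?_, fun hf => by cases hf⟩
        -- nxt is gray: a cycle through nxt
        rcases hgrays nxt hnok hvis with ⟨nxt', hn1, hn2⟩
        have ht' : Relation.TransGen (EE tree) nxt' nxt := Relation.TransGen.tail' hn2 henxt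
        rcases transgen_wk tree nxt' nxt ht' with ⟨k, hk1, hk⟩
        have hcycle : Relation.TransGen (EE tree) nxt nxt :=
          wk_trans tree k nxt nxt hk1 (wk_congr_start tree k nxt' nxt nxt hk1 hn1 hk)
        exact ⟨nxt, Relation.ReflTransGen.tail hr0 henxt, hcycle⟩
      · have hbr : pvGo fuel tree s (nxt :: rest) vis chk = pvGo fuel tree s rest vis chk := by
          simp only [pvGo]
          rw [if_neg (by rw [hchkb]; exact hchk), if_neg (by rw [hvisb]; exact hvis)]
        rw [hbr]
        -- nxt is black: skip it
        have hnbl : BlackP tree.length vis chk nxt := ⟨hchk, by omega⟩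
        exact ih s vis chk hinv hsok
          (fun x hx => hsucc x (List.mem_cons_of_mem nxt hx))
          (by
            intro x hx
            rcases hproc x hx with hx' | hxb
            · rcases List.mem_cons.1 hx' with rfl | hx''
              · exact Or.inr hnbl
              · exact Or.inl hx''
            · exact Or.inr hxb)
          hviss hchks hgrays hr0 hfuel

theorem dfs_main (tree : List (List Int)) (hok : TreeOK tree) :
    ∀ fuel : Nat, DfsSpec tree fuel := by
  intro fuel
  induction fuel with
  | zero =>
    intro s vis chk _ _ _ _ _ hfuel
    exact absurd hfuel (Nat.not_lt_zero _)
  | succ fuel ih =>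
    intro s vis chk hinv hsok hchks hgrays hr0 hfuel
    have hinv' := hinv
    rcases hinv' with ⟨hvl, hcl, hgc, hbc, hbs⟩
    have hslt : VIdx tree.length s < tree.length := VIdx_lt_aux tree.length s hsok
    have hviss0 : vis.getD (VIdx tree.length s) 0 = 0 := by
      by_contra hc
      exact (hgc s hc) hchks
    have hsetv : PySem.List.pySetD vis s 1 = vis.set (VIdx tree.length s) 1 := by
      have := pvSetD_bridge vis s (1 : Int) (by rw [hvl]; exact hsok)
      rw [this, hvl]
    have hsetc : PySem.List.pySetD chk s 1 = chk.set (VIdx tree.length s) 1 := by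
      have := pvSetD_bridge chk s (1 : Int) (by rw [hcl]; exact hsok)
      rw [this, hcl]
    have htb : PySem.List.pyGetD tree s [] = tree.getD (VIdx tree.length s) [] :=
      pvGetD_bridge tree s [] hsok
    have hbr : pvDfs (fuel + 1) tree s vis chk =
        pvGo fuel tree s (tree.getD (VIdx tree.length s) [])
          (vis.set (VIdx tree.length s) 1) (chk.set (VIdx tree.length s) 1) := by
      simp only [pvDfs]
      rw [hsetv, hsetc, htb]
    -- getD facts for the marked state
    have hgv : ∀ i : Nat, (vis.set (VIdx tree.length s) 1).getD i 0 =
        if i = VIdx tree.length s then 1 else vis.getD i 0 := by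
      intro i
      by_cases hi : i = VIdx tree.length s
      · subst hi; rw [if_pos rfl, getD_set_eq vis _ 1 (by omega)]
      · rw [if_neg hi, getD_set_ne vis _ i 1 hi]
    have hgcq : ∀ i : Nat, (chk.set (VIdx tree.length s) 1).getD i 0 =
        if i = VIdx tree.length s then 1 else chk.getD i 0 := by
      intro i
      by_cases hi : i = VIdx tree.length s
      · subst hi; rw [if_pos rfl, getD_set_eq chk _ 1 (by omega)]
      · rw [if_neg hi, getD_set_ne chk _ i 1 hi]
    -- StInv for the marked state
    have hinv1 : StInv tree (vis.set (VIdx tree.length s) 1) (chk.set (VIdx tree.length s) 1) := by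
      refine ⟨by simp [hvl], by simp [hcl], ?_, ?_, ?_⟩
      · intro v hv
        unfold GrayP at hv
        rw [hgv] at hv
        rw [hgcq]
        by_cases hvs : VIdx tree.length v = VIdx tree.length s
        · rw [if_pos hvs]; omega
        · rw [if_neg hvs]
          rw [if_neg hvs] at hv
          exact hgc v hv
      · intro b hbok hb w hew
        have hbold : BlackP tree.length vis chk b := by
          rcases hb with ⟨h1, h2⟩
          rw [hgv] at h2
          rw [hgcq] at h1
          by_cases hbsq : VIdx tree.length b = VIdx tree.length s
          · rw [if_pos hbsq] at h2; omega
          · rw [if_neg hbsq] at h1 h2; exact ⟨h1, h2⟩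
        have hwold := hbc b hbok hbold w hew
        have hws : VIdx tree.length w ≠ VIdx tree.length s := by
          intro heq
          rcases hwold with ⟨h1, _⟩
          rw [heq] at h1
          exact h1 hchks
        rcases hwold with ⟨h1, h2⟩
        constructor
        · rw [hgcq, if_neg hws]; exact h1
        · rw [hgv, if_neg hws]; exact h2
      · intro b hbok hb v hrv ht
        have hbold : BlackP tree.length vis chk b := by
          rcases hb with ⟨h1, h2⟩
          rw [hgv] at h2
          rw [hgcq] at h1
          by_cases hbsq : VIdx tree.length b = VIdx tree.length s
          · rw [if_pos hbsq] at h2; omega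
          · rw [if_neg hbsq] at h1 h2; exact ⟨h1, h2⟩
        exact hbs b hbok hbold v hrv ht
    have hgo := go_spec tree hok fuel ih (tree.getD (VIdx tree.length s) []) s
      (vis.set (VIdx tree.length s) 1) (chk.set (VIdx tree.length s) 1)
      hinv1 hsok
      (fun x hx => hx)
      (fun x hx => Or.inl hx)
      (by rw [hgv, if_pos rfl]; omega)
      (by rw [hgcq, if_pos rfl]; omega)
      (by
        intro g hgok hgray
        unfold GrayP at hgray
        rw [hgv] at hgray
        by_cases hgs : VIdx tree.length g = VIdx tree.length s
        · exact ⟨s, hgs.symm, Relation.ReflTransGen.refl⟩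
        · rw [if_neg hgs] at hgray
          exact hgrays g hgok hgray)
      hr0
      (by
        have := UC_set_one chk (VIdx tree.length s) (by omega) hchks
        omega)
    rcases hgo with ⟨hgt, hgf⟩
    rw [hbr]
    refine ⟨hgt, fun hf => ?_⟩
    rcases hgf hf with ⟨hinv2, hvis2, hchk2⟩
    refine ⟨hinv2, ?_, ?_, ?_⟩
    · intro i
      rw [hvis2 i]
      by_cases hi : i = VIdx tree.length s
      · subst hi
        rw [getD_set_eq _ _ 0 (by simp [hvl]; omega), hviss0]
      · rw [getD_set_ne _ _ i 0 hi, hgv, if_neg hi]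
    · intro i hi
      apply hchk2
      rw [hgcq]
      by_cases his : i = VIdx tree.length s
      · rw [if_pos his]; omega
      · rw [if_neg his]; exact hi
    · apply hchk2
      rw [hgcq, if_pos rfl]
      omega

def BOK (N : Nat) (t : List (List Int)) : Prop := ∀ l ∈ t, ∀ v ∈ l, VOK N v

theorem pvPush_len (t : List (List Int)) (i x : Int) : (pvPush t i x).length = t.length :=
  PySem.List.length_pySetD t i _

theorem bucket_ok (N : Nat) (g : List (List Int)) (hg : BOK N g) (i : Int) :
    ∀ x ∈ PySem.List.pyGetD g i [], VOK N x := by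
  intro x hx
  by_cases hr : PySem.Raise.InRange g.length i
  · exact hg _ (PySem.List.pyGetD_mem g [] hr) x hx
  · rw [PySem.List.pyGetD_of_none g i []
      ((PySem.List.pyGet?_eq_none_iff g i).2 hr)] at hx
    cases hx

theorem pvPush_ok (N : Nat) (t : List (List Int)) (ht : BOK N t) (i x : Int)
    (hx : VOK N x) : BOK N (pvPush t i x) := by
  intro l hl v hv
  unfold pvPush at hl
  by_cases hr : PySem.Raise.InRange t.length i
  · rw [pvSetD_bridge t i _ hr] at hl
    rcases List.mem_or_eq_of_mem_set hl with hl' | rfl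
    · exact ht l hl' v hv
    · rcases List.mem_append.1 hv with hv' | hv'
      · exact bucket_ok N t ht i v hv'
      · rw [List.mem_singleton] at hv'
        subst hv'
        exact hx
  · unfold PySem.List.pySetD at hl
    rw [(PySem.List.pySet?_eq_none_iff t i _).2 hr] at hl
    exact ht l hl v hv

theorem graph_fold_ok (N : Nat) :
    ∀ (rows : List (List Int)) (t : List (List Int)),
      t.length = N → BOK N t →
      (∀ r ∈ rows, ∀ x ∈ r, VOK N x) →
      ((rows.foldl (fun g row =>
        match row with
        | [u, v] => pvPush (pvPush g u v) v u
        | _ => g) t).length = N ∧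
       BOK N (rows.foldl (fun g row =>
        match row with
        | [u, v] => pvPush (pvPush g u v) v u
        | _ => g) t)) := by
  intro rows
  induction rows with
  | nil => intro t hlen hok _; exact ⟨hlen, hok⟩
  | cons r rows ih =>
    intro t hlen hok hr
    rw [List.foldl_cons]
    have hrtail : ∀ r' ∈ rows, ∀ x ∈ r', VOK N x :=
      fun r' h x hx => hr r' (List.mem_cons_of_mem r h) x hx
    cases r with
    | nil => exact ih t hlen hok hrtail
    | cons u r2 =>
      cases r2 with
      | nil => exact ih t hlen hok hrtail
      | cons v r3 =>
        cases r3 with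
        | nil =>
          have hu : VOK N u := hr [u, v] List.mem_cons_self u (by simp)
          have hv : VOK N v := hr [u, v] List.mem_cons_self v (by simp)
          exact ih _ (by rw [pvPush_len, pvPush_len]; exact hlen)
            (pvPush_ok N _ (pvPush_ok N t hok u v hv) v u hu) hrtail
        | cons w r4 => exact ih t hlen hok hrtail

theorem order_fold_ok (N : Nat) :
    ∀ (rows : List (List Int)) (t : List (List Int)),
      t.length = N → BOK N t →
      (∀ r ∈ rows, ∀ x ∈ r, VOK N x) →
      ((rows.foldl (fun t row =>
        match row with
        | [u, v] => pvPush t u v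
        | _ => t) t).length = N ∧
       BOK N (rows.foldl (fun t row =>
        match row with
        | [u, v] => pvPush t u v
        | _ => t) t)) := by
  intro rows
  induction rows with
  | nil => intro t hlen hok _; exact ⟨hlen, hok⟩
  | cons r rows ih =>
    intro t hlen hok hr
    rw [List.foldl_cons]
    have hrtail : ∀ r' ∈ rows, ∀ x ∈ r', VOK N x :=
      fun r' h x hx => hr r' (List.mem_cons_of_mem r h) x hx
    cases r with
    | nil => exact ih t hlen hok hrtail
    | cons u r2 =>
      cases r2 with
      | nil => exact ih t hlen hok hrtail
      | cons v r3 =>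
        cases r3 with
        | nil =>
          have hv : VOK N v := hr [u, v] List.mem_cons_self v (by simp)
          exact ih _ (by rw [pvPush_len]; exact hlen) (pvPush_ok N t hok u v hv) hrtail
        | cons w r4 => exact ih t hlen hok hrtail

theorem bfs_fold_ok (N : Nat) (graph : List (List Int)) (hg : BOK N graph) (cur : Int) :
    ∀ (ws : List Int), (∀ x ∈ ws, VOK N x) →
    ∀ (st : List Int × List Int × List (List Int)),
      st.2.2.length = N → BOK N st.2.2 →
      ((ws.foldl (fun (st : List Int × List Int × List (List Int)) nxt =>
          if PySem.List.pyGetD st.2.1 nxt 0 = 0 then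
            (st.1 ++ [nxt], PySem.List.pySetD st.2.1 nxt 1, pvPush st.2.2 cur nxt)
          else st) st).2.2.length = N ∧
       BOK N ((ws.foldl (fun (st : List Int × List Int × List (List Int)) nxt =>
          if PySem.List.pyGetD st.2.1 nxt 0 = 0 then
            (st.1 ++ [nxt], PySem.List.pySetD st.2.1 nxt 1, pvPush st.2.2 cur nxt)
          else st) st)).2.2) := by
  intro ws
  induction ws with
  | nil => intro _ st h1 h2; exact ⟨h1, h2⟩
  | cons w ws ih =>
    intro hws st h1 h2
    rw [List.foldl_cons]
    by_cases hc : PySem.List.pyGetD st.2.1 w 0 = 0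
    · rw [if_pos hc]
      exact ih (fun x hx => hws x (List.mem_cons_of_mem w hx)) _
        (by rw [pvPush_len]; exact h1)
        (pvPush_ok N st.2.2 h2 cur w (hws w List.mem_cons_self))
    · rw [if_neg hc]
      exact ih (fun x hx => hws x (List.mem_cons_of_mem w hx)) st h1 h2

theorem pvBfs_ok (N : Nat) (graph : List (List Int)) (hg : BOK N graph) :
    ∀ (fuel : Nat) (queue visited : List Int) (tr : List (List Int)),
      tr.length = N → BOK N tr →
      ((pvBfs fuel graph queue visited tr).length = N ∧
        BOK N (pvBfs fuel graph queue visited tr)) := by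
  intro fuel
  induction fuel with
  | zero => intro _ _ tr h1 h2; exact ⟨h1, h2⟩
  | succ fuel ih =>
    intro queue visited tr h1 h2
    cases queue with
    | nil => exact ⟨h1, h2⟩
    | cons cur qs =>
      have hfold := bfs_fold_ok N graph hg cur (PySem.List.pyGetD graph cur [])
        (bucket_ok N graph hg cur) (qs, visited, tr) h1 h2
      have hred : pvBfs (fuel + 1) graph (cur :: qs) visited tr =
          pvBfs fuel graph _ _ _ := rfl
      rw [hred]
      exact ih _ _ _ hfold.1 hfold.2

theorem pvTree_len (n : Int) (path order : List (List Int)) (hn : 0 ≤ n)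
    (hpre : Pre_solution n path order) :
    (pvTree n path order).length = (n + 1).toNat ∧
      BOK (n + 1).toNat (pvTree n path order) := by
  rcases hpre with ⟨_, hpath, horder⟩
  have hvok : ∀ (rows : List (List Int)),
      (∀ r ∈ rows, r.length = 2 ∧ ∀ x ∈ r, -(n + 1) ≤ x ∧ x ≤ n) →
      (∀ r ∈ rows, ∀ x ∈ r, VOK (n + 1).toNat x) := by
    intro rows hrows r hr x hx
    rcases hrows r hr with ⟨_, hb⟩
    rcases hb x hx with ⟨h1, h2⟩
    constructor
    · have : ((n + 1).toNat : Int) = n + 1 := by omega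
      rw [this]; omega
    · have : ((n + 1).toNat : Int) = n + 1 := by omega
      rw [this]; omega
  have hrep : (List.replicate (n + 1).toNat ([] : List Int)).length = (n + 1).toNat := by simp
  have hrepok : BOK (n + 1).toNat (List.replicate (n + 1).toNat ([] : List Int)) := by
    intro l hl v hv
    rw [List.eq_of_mem_replicate hl] at hv
    cases hv
  have hgraph := graph_fold_ok (n + 1).toNat path _ hrep hrepok (hvok path hpath)
  have hbfs := pvBfs_ok (n + 1).toNat _ hgraph.2 (n + 2).toNat [0]
    (PySem.List.pySetD (List.replicate (n + 1).toNat (0 : Int)) 0 1) _ hrep hrepok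
  have := order_fold_ok (n + 1).toNat order _ hbfs.1 hbfs.2 (hvok order horder)
  exact this

theorem pvTree_ok (n : Int) (path order : List (List Int))
    (hpre : Pre_solution n path order) : TreeOK (pvTree n path order) := by
  have h := pvTree_len n path order hpre.1 hpre
  intro l hl v hv
  rw [h.1]
  exact h.2 l hl v hv

theorem getD_rep0 (L i : Nat) : (List.replicate L (0 : Int)).getD i 0 = 0 := by
  by_cases hi : i < L
  · exact List.getD_replicate 0 hi
  · rw [List.getD_eq_default _ _ (by simpa using hi)]

theorem VIdx_zero (N : Nat) : VIdx N 0 = 0 := by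
  unfold VIdx; simp

theorem TC_replicate (L : Nat) : TC (List.replicate L (0 : Int)) = 0 := by
  unfold TC
  rw [Finset.card_eq_zero]
  apply Finset.filter_false_of_mem
  intro i hi
  simp only [Finset.mem_range, List.length_replicate] at hi
  simp

theorem solution_eq (n : Int) (path order : List (List Int))
    (hpre : Pre_solution n path order) :
    solution n path order = solution_alt n path order := by
  have hn : 0 ≤ n := hpre.1
  obtain ⟨htl, hbok⟩ := pvTree_len n path order hn hpre
  have hok : TreeOK (pvTree n path order) := pvTree_ok n path order hpre
  have hL1 : 1 ≤ (n + 1).toNat := by omega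
  have hNpos : 0 < (pvTree n path order).length := by rw [htl]; omega
  have hvok0 : VOK (pvTree n path order).length 0 :=
    ⟨by omega, by exact_mod_cast hNpos⟩
  have hreplen : (List.replicate (n + 1).toNat (0 : Int)).length = (pvTree n path order).length := by
    rw [htl]; simp
  -- ===== the DFS side =====
  have hds := dfs_main (pvTree n path order) hok (n + 2).toNat 0
    (List.replicate (n + 1).toNat 0) (List.replicate (n + 1).toNat 0)
    ⟨hreplen, hreplen,
      (fun v hg => absurd (getD_rep0 _ _) hg),
      (fun b _ hb => absurd (getD_rep0 _ _) hb.1),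
      (fun b _ hb => absurd (getD_rep0 _ _) hb.1)⟩
    hvok0
    (getD_rep0 _ _)
    (fun g _ hg => absurd (getD_rep0 _ _) hg)
    Relation.ReflTransGen.refl
    (by rw [UC_replicate]; omega)
  rcases hds with ⟨hdt, hdf⟩
  have hAc : (pvDfs (n + 2).toNat (pvTree n path order) 0
      (List.replicate (n + 1).toNat 0) (List.replicate (n + 1).toNat 0)).1 = false →
      ¬ CycR (pvTree n path order) := by
    intro hf hcyc
    rcases hdf hf with ⟨⟨_, _, _, _, hsafe⟩, hvis, _, hchk0⟩
    have hb0 : BlackP (pvTree n path order).length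
        (pvDfs (n + 2).toNat (pvTree n path order) 0
          (List.replicate (n + 1).toNat 0) (List.replicate (n + 1).toNat 0)).2.1
        (pvDfs (n + 2).toNat (pvTree n path order) 0
          (List.replicate (n + 1).toNat 0) (List.replicate (n + 1).toNat 0)).2.2 0 :=
      ⟨hchk0, by rw [hvis _]; exact getD_rep0 _ _⟩
    rcases hcyc with ⟨v, hrv, htv⟩
    exact hsafe 0 hvok0 hb0 v hrv htv
  -- ===== the reach/frontier side =====
  have hseen0 : PySem.List.pySetD (List.replicate (n + 1).toNat (0 : Int)) 0 1 =
      (List.replicate (n + 1).toNat (0 : Int)).set 0 1 := by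
    have := pvSetD_bridge (List.replicate (n + 1).toNat (0 : Int)) 0 (1 : Int)
      (by rw [hreplen]; exact hvok0)
    rw [this, VIdx_zero]
  have hseen0len : ((List.replicate (n + 1).toNat (0 : Int)).set 0 1).length =
      (pvTree n path order).length := by simp [hreplen]
  have hs00 : ((List.replicate (n + 1).toNat (0 : Int)).set 0 1).getD 0 0 = 1 :=
    getD_set_eq _ 0 1 (by simp; omega)
  have hs0ne : ∀ i : Nat, i ≠ 0 →
      ((List.replicate (n + 1).toNat (0 : Int)).set 0 1).getD i 0 = 0 := by
    intro i hi
    rw [getD_set_ne _ 0 i 1 hi]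
    exact getD_rep0 _ _
  have hucs : UC ((List.replicate (n + 1).toNat (0 : Int)).set 0 1) + 1 = (n + 1).toNat := by
    have := UC_set_one (List.replicate (n + 1).toNat (0 : Int)) 0 (by simp; omega) (getD_rep0 _ _)
    rw [UC_replicate] at this
    exact this
  have htcs : TC ((List.replicate (n + 1).toNat (0 : Int)).set 0 1) = 1 := by
    have := TC_set_one (List.replicate (n + 1).toNat (0 : Int)) 0 (by simp; omega) (getD_rep0 _ _)
    rw [TC_replicate] at this
    omega
  have hrm := reach_main (pvTree n path order) hok (n + 2).toNat [0]
    ((List.replicate (n + 1).toNat (0 : Int)).set 0 1) 1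
    hseen0len
    (by simp only [List.length_cons, List.length_nil]; omega)
    (by intro v hv; rw [List.mem_singleton] at hv; subst hv; exact hvok0)
    (by
      intro i hi hsi
      by_cases hi0 : i = 0
      · subst hi0
        exact Or.inl ⟨0, List.mem_singleton.2 rfl, VIdx_zero _⟩
      · exact absurd (hs0ne i hi0) hsi)
    (by rw [htcs]; simp)
  rcases hrm with ⟨hlenF, hmonoF, hclosedF, hcntF⟩
  have h0F : (pvReach (n + 2).toNat (pvTree n path order) [0]
      ((List.replicate (n + 1).toNat (0 : Int)).set 0 1) 1).1.getD
      (VIdx (pvTree n path order).length 0) 0 ≠ 0 := by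
    rw [VIdx_zero]
    exact hmonoF 0 (by rw [hs00]; omega)
  have htoNat : (pvReach (n + 2).toNat (pvTree n path order) [0]
      ((List.replicate (n + 1).toNat (0 : Int)).set 0 1) 1).2.toNat =
      TC (pvReach (n + 2).toNat (pvTree n path order) [0]
        ((List.replicate (n + 1).toNat (0 : Int)).set 0 1) 1).1 := by
    rw [hcntF]; exact Int.toNat_natCast _
  have hmemfr : ∀ v : Int,
      (v ∈ pvFrontier (TC (pvReach (n + 2).toNat (pvTree n path order) [0]
          ((List.replicate (n + 1).toNat (0 : Int)).set 0 1) 1).1)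
        (pvTree n path order) [0]) ↔
      Wk (pvTree n path order) (TC (pvReach (n + 2).toNat (pvTree n path order) [0]
          ((List.replicate (n + 1).toNat (0 : Int)).set 0 1) 1).1) 0 v := by
    intro v
    rw [mem_pvFrontier (pvTree n path order) hok _ [0]
      (by intro u hu; rw [List.mem_singleton] at hu; subst hu; exact hvok0) v]
    constructor
    · rintro ⟨u, hu, hw⟩
      rw [List.mem_singleton] at hu
      subst hu
      exact hw
    · intro hw
      exact ⟨0, List.mem_singleton.2 rfl, hw⟩
  -- ===== combine =====
  show (!(pvDfs (n + 2).toNat (pvTree n path order) 0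
      (List.replicate (n + 1).toNat 0) (List.replicate (n + 1).toNat 0)).1) = _
  rw [show solution_alt n path order =
      (pvFrontier (pvReach (n + 2).toNat (pvTree n path order) [0]
        ((List.replicate (n + 1).toNat (0 : Int)).set 0 1) 1).2.toNat
        (pvTree n path order) [0]).isEmpty from by
    unfold solution_alt
    rw [hseen0]
    rfl]
  rw [htoNat]
  by_cases hc : CycR (pvTree n path order)
  · have hd1 : (pvDfs (n + 2).toNat (pvTree n path order) 0
        (List.replicate (n + 1).toNat 0) (List.replicate (n + 1).toNat 0)).1 = true := by
      cases h : (pvDfs (n + 2).toNat (pvTree n path order) 0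
        (List.replicate (n + 1).toNat 0) (List.replicate (n + 1).toNat 0)).1
      · exact absurd hc (hAc h)
      · rfl
    rw [hd1]
    rcases cyc_long_walk (pvTree n path order) hc
      (TC (pvReach (n + 2).toNat (pvTree n path order) [0]
        ((List.replicate (n + 1).toNat (0 : Int)).set 0 1) 1).1) with ⟨v, hv⟩
    have hne : pvFrontier (TC (pvReach (n + 2).toNat (pvTree n path order) [0]
        ((List.replicate (n + 1).toNat (0 : Int)).set 0 1) 1).1)
        (pvTree n path order) [0] ≠ [] := by
      intro hnil
      have := (hmemfr v).2 hv
      rw [hnil] at this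
      cases this
    simp [hne]
  · have hd0 : (pvDfs (n + 2).toNat (pvTree n path order) 0
        (List.replicate (n + 1).toNat 0) (List.replicate (n + 1).toNat 0)).1 = false := by
      cases h : (pvDfs (n + 2).toNat (pvTree n path order) 0
        (List.replicate (n + 1).toNat 0) (List.replicate (n + 1).toNat 0)).1
      · rfl
      · exact absurd (hdt h) hc
    rw [hd0]
    have hnil : pvFrontier (TC (pvReach (n + 2).toNat (pvTree n path order) [0]
        ((List.replicate (n + 1).toNat (0 : Int)).set 0 1) 1).1)
        (pvTree n path order) [0] = [] := by
      by_contra hne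
      rcases List.exists_mem_of_ne_nil _ hne with ⟨v, hv⟩
      exact hc (pigeon (pvTree n path order) hok hNpos _ hlenF hclosedF h0F v ((hmemfr v).1 hv))
    rw [hnil]
    rfl

-- ===== VERDICT (by name: the statement is the Claim_ definition above) =====
theorem solution_spec : Claim_equal_solution := by
  intro n path order _ hpre
  unfold Spec_solution
  exact solution_eq n path order hpre
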